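-- pv_equiv track=rewrite | github.com/XkaunanX/CriptoUtn | cosmo-algoritmos/algoritmos_nuevos/shannon_fano2.py | decodificar_shannon_fano
-- ===== SOURCE A (Python) =====
-- def decodificar_shannon_fano(texto_codificado, codigos):
--     """Decodifica el texto binario utilizando los códigos de Shannon-Fano"""
--     codigos_invertidos = {v: k for k, v in codigos.items()}
--     codigo_actual = ''
--     texto_decodificado = ''
--     for bit in texto_codificado:
--         codigo_actual += bit
--         if codigo_actual in codigos_invertidos:
--             texto_decodificado += codigos_invertidos[codigo_actual]
--             codigo_actual = ''
--     return texto_decodificado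
-- ===== SOURCE B (Python) =====
-- def decodificar_shannon_fano(texto_codificado, codigos):
--     """Decodifica recorriendo el texto por posiciones: en cada posicion busca
--     la longitud minima L tal que el trozo texto[i:i+L] sea un codigo."""
--     inv = {v: k for k, v in codigos.items()}
--     out = []
--     i = 0
--     n = len(texto_codificado)
--     while i < n:
--         for L in range(1, n - i + 1):
--             sym = inv.get(texto_codificado[i:i + L])
--             if sym is not None:
--                 out.append(sym)
--                 i += L
--                 break
--         else:
--             break
--     return ''.join(out)
-- ===== Notes on version B (the rewrite author's own statement) =====
-- stated objective: alternative
-- what changed: Replaces the single-pass growing-accumulator scan with a position-based decoder: at each position it searches for the minimal code length matching a slice of the text, emits the symbol and jumps ahead by that length.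
import Mathlib
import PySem

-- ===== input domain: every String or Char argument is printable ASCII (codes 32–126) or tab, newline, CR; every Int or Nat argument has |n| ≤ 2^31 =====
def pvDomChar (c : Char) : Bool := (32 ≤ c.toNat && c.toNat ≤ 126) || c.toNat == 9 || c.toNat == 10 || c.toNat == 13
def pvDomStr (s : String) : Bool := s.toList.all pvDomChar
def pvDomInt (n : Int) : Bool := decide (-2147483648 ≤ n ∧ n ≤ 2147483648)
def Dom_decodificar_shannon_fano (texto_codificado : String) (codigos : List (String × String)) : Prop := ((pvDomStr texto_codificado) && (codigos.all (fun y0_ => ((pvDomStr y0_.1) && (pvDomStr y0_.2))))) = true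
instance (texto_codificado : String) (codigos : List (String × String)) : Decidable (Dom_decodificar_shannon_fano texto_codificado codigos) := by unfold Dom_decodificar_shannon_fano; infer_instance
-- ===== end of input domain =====

-- B decodes by position: at each index it searches the minimal code length matching a slice, instead of A's growing-accumulator single pass; objective: alternative.


-- shared input interpretation: the inverted dict {v: k for k, v in codigos.items()}
-- (codigos is a Python dict; Dict.ofList realises dict construction from the assoc list)
def pvInverted (codigos : List (String × String)) : PySem.Dict String String :=
  (PySem.Dict.ofList codigos).items.foldl (fun acc p => acc.insert p.2 p.1) PySem.Dict.empty

-- ===== PORT A =====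
def decodificar_shannon_fano (texto_codificado : String) (codigos : List (String × String)) : String :=
  let inv := pvInverted codigos
  let r := texto_codificado.toList.foldl
    (fun (st : List Char × List Char) bit =>
      let cur := st.1 ++ [bit]
      match inv.get? (String.mk cur) with
      | some sym => ([], st.2 ++ sym.toList)
      | none => (cur, st.2)) ([], [])
  String.mk r.2

-- ===== PORT B =====
-- inner 'for L in range(1, n-i+1)' loop: try each length on the current suffix
def pvTryLens (inv : PySem.Dict String String) (s : List Char) : List Nat → Option (Nat × String)
  | [] => none
  | L :: Ls =>
    match inv.get? (String.mk (s.take L)) with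
    | some sym => some (L, sym)
    | none => pvTryLens inv s Ls

theorem pvTryLens_mem {inv : PySem.Dict String String} {s : List Char} :
    ∀ {Ls : List Nat} {L : Nat} {sym : String},
      pvTryLens inv s Ls = some (L, sym) → L ∈ Ls := by
  intro Ls
  induction Ls with
  | nil => intro L sym h; simp [pvTryLens] at h
  | cons M Ms ih =>
    intro L sym h
    simp only [pvTryLens] at h
    cases hg : inv.get? (String.mk (s.take M)) with
    | some w => rw [hg] at h; simp at h; simp [h.1]
    | none => rw [hg] at h; exact List.mem_cons_of_mem _ (ih h)

-- outer 'while i < n' loop, recursing on the remaining suffix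
def pvScan (inv : PySem.Dict String String) (s : List Char) : List Char :=
  match h : pvTryLens inv s (List.range' 1 s.length) with
  | some (L, sym) => sym.toList ++ pvScan inv (s.drop L)
  | none => []
termination_by s.length
decreasing_by
  have hm := pvTryLens_mem h
  have := List.mem_range'_1.mp hm
  simp only [List.length_drop]
  omega

def decodificar_shannon_fano_alt (texto_codificado : String) (codigos : List (String × String)) : String :=
  String.mk (pvScan (pvInverted codigos) texto_codificado.toList)

-- ===== PRECONDITION & SPEC =====
def Spec_decodificar_shannon_fano (texto_codificado : String) (codigos : List (String × String)) (out : String) : Prop := out = decodificar_shannon_fano_alt texto_codificado codigos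
instance (texto_codificado : String) (codigos : List (String × String)) (out : String) : Decidable (Spec_decodificar_shannon_fano texto_codificado codigos out) := by unfold Spec_decodificar_shannon_fano; infer_instance

-- ===== CLAIM (what is proved, stated in full; the proofs are below) =====
def Claim_equal_decodificar_shannon_fano : Prop := ∀ (texto_codificado : String) (codigos : List (String × String)), Dom_decodificar_shannon_fano texto_codificado codigos → Spec_decodificar_shannon_fano texto_codificado codigos (decodificar_shannon_fano texto_codificado codigos)

-- ===== LEMMAS AND PROOFS =====

theorem pvScan_none {inv : PySem.Dict String String} {s : List Char}
    (h : pvTryLens inv s (List.range' 1 s.length) = none) : pvScan inv s = [] := by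
  rw [pvScan]; split <;> simp_all

theorem pvScan_some {inv : PySem.Dict String String} {s : List Char} {L : Nat} {sym : String}
    (h : pvTryLens inv s (List.range' 1 s.length) = some (L, sym)) :
    pvScan inv s = sym.toList ++ pvScan inv (s.drop L) := by
  rw [pvScan]; split <;> simp_all

theorem pvTryLens_all_none {inv : PySem.Dict String String} {s : List Char} {Ls : List Nat}
    (h : ∀ L ∈ Ls, inv.get? (String.mk (s.take L)) = none) : pvTryLens inv s Ls = none := by
  induction Ls with
  | nil => rfl
  | cons M Ms ih =>
    simp only [pvTryLens]
    rw [h M (List.mem_cons_self)]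
    exact ih (fun L hL => h L (List.mem_cons_of_mem _ hL))

theorem pvTryLens_append {inv : PySem.Dict String String} {s : List Char} {Ls Ms : List Nat}
    (h : pvTryLens inv s Ls = none) : pvTryLens inv s (Ls ++ Ms) = pvTryLens inv s Ms := by
  induction Ls with
  | nil => rfl
  | cons M Ns ih =>
    simp only [List.cons_append, pvTryLens] at h ⊢
    cases hg : inv.get? (String.mk (s.take M)) with
    | some w => rw [hg] at h; simp at h
    | none => rw [hg] at h; simp only [hg]; exact ih h

-- main loop correspondence: A's fold with accumulated prefix `cur` (all of whose
-- nonempty prefixes fail lookup) produces out ++ pvScan inv (cur ++ rest)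
theorem mainA (inv : PySem.Dict String String) :
    ∀ (rest cur out : List Char),
      (∀ j, 1 ≤ j → j ≤ cur.length → inv.get? (String.mk (cur.take j)) = none) →
      (rest.foldl
        (fun (st : List Char × List Char) bit =>
          let cur := st.1 ++ [bit]
          match inv.get? (String.mk cur) with
          | some sym => ([], st.2 ++ sym.toList)
          | none => (cur, st.2)) (cur, out)).2 = out ++ pvScan inv (cur ++ rest) := by
  intro rest
  induction rest with
  | nil =>
    intro cur out hinv
    have hnone : pvTryLens inv cur (List.range' 1 cur.length) = none := by
      apply pvTryLens_all_none
      intro L hL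
      have := List.mem_range'_1.mp hL
      exact hinv L this.1 (by omega)
    simp [pvScan_none hnone]
  | cons c rs ih =>
    intro cur out hinv
    simp only [List.foldl_cons]
    cases hg : inv.get? (String.mk (cur ++ [c])) with
    | none =>
      have hinv' : ∀ j, 1 ≤ j → j ≤ (cur ++ [c]).length →
          inv.get? (String.mk ((cur ++ [c]).take j)) = none := by
        intro j h1 h2
        simp only [List.length_append, List.length_cons, List.length_nil] at h2
        by_cases hj : j ≤ cur.length
        · rw [List.take_append_of_le_length hj]; exact hinv j h1 hj
        · have : j = cur.length + 1 := by omega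
          subst this
          rw [List.take_of_length_le (by simp)]
          exact hg
      have := ih (cur ++ [c]) out hinv'
      simp only [hg] at *
      rw [this, List.append_assoc]
      simp
    | some sym =>
      have hIH := ih [] (out ++ sym.toList) (by intro j h1 h2; simp at h2; omega)
      simp only [hg, List.nil_append] at hIH ⊢
      rw [hIH]
      have hsplit : List.range' 1 (cur ++ c :: rs).length =
          List.range' 1 cur.length ++ List.range' (1 + cur.length) (rs.length + 1) := by
        have hlen : (cur ++ c :: rs).length = cur.length + (rs.length + 1) := by simp
        rw [hlen, ← List.range'_append]
        norm_num
      have hfirst : pvTryLens inv (cur ++ c :: rs) (List.range' 1 cur.length) = none := by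
        apply pvTryLens_all_none
        intro L hL
        have hLr := List.mem_range'_1.mp hL
        rw [List.take_append_of_le_length (by omega)]
        exact hinv L hLr.1 (by omega)
      have hsome : pvTryLens inv (cur ++ c :: rs) (List.range' 1 (cur ++ c :: rs).length)
          = some (cur.length + 1, sym) := by
        rw [hsplit, pvTryLens_append hfirst]
        rw [List.range'_succ]
        simp only [pvTryLens]
        have htake : (cur ++ c :: rs).take (1 + cur.length) = cur ++ [c] := by
          rw [Nat.add_comm, List.take_append]
          simp
        rw [htake, hg, Nat.add_comm]
      rw [pvScan_some hsome]
      have hdrop : (cur ++ c :: rs).drop (cur.length + 1) = rs := by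
        simp [List.drop_append]
      rw [hdrop, List.append_assoc]

-- ===== VERDICT (by name: the statement is the Claim_ definition above) =====
theorem decodificar_shannon_fano_spec : Claim_equal_decodificar_shannon_fano := by
  intro t codigos _
  have h := mainA (pvInverted codigos) t.toList [] [] (by intro j h1 h2; simp at h2; omega)
  simp only [List.nil_append] at h
  simp only [Spec_decodificar_shannon_fano, decodificar_shannon_fano, decodificar_shannon_fano_alt]
  rw [h]
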